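-- pv_equiv track=rewrite | github.com/alexxx998/lab1 | client.py | encoding_word
-- ===== SOURCE A (Python) =====
-- word_len = 65
--
-- def encoding_word(x):
--     y = x
--     for i in range(word_len):
--         bit = 0
--         if(y & (1 << i)):
--             bit = 1
--         if(bit):
--             for len in range(8):
--                 sz = 1 << len
--                 y ^= 1 << (word_len + (i // sz) % 2 + 2 * len)
--     return y
-- ===== SOURCE B (Python) =====
-- word_len = 65
--
-- def encoding_word(x):
--     y = x
--     for lev in range(8):
--         for b in range(2):
--             m = 0
--             for i in range(word_len):
--                 if (i >> lev) & 1 == b: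
--                     m |= 1 << i
--             if bin(x & m).count('1') & 1:
--                 y ^= 1 << (word_len + 2 * lev + b)
--     return y
-- ===== Notes on version B (the rewrite author's own statement) =====
-- stated objective: alternative
-- what changed: Replaces A's per-set-bit accumulation (for every set bit i of x, XOR one parity bit per level) by a per-parity-check computation: for each parity check (level, value) build the constant coverage mask and set the check bit iff popcount(x & mask) is odd.
import Mathlib
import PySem

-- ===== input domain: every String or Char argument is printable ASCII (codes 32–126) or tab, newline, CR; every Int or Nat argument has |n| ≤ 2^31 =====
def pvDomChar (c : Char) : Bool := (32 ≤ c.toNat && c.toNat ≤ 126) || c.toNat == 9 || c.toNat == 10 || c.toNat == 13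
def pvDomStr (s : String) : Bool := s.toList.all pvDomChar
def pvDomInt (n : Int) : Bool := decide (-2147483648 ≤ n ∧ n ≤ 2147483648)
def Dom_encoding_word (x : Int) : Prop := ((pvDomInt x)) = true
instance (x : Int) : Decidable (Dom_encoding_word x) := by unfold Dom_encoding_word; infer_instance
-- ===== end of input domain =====

-- B replaces A's per-set-bit accumulation by sixteen mask/popcount parity checks; objective: alternative (same cost, different algorithm).

-- ===== PORT A =====
-- literal port of Source A: for each i in range(65), if bit i of y is set, XOR one parity bit per level.
-- '1 << i' is '(1:Int) <<< i.toNat' (exact: here i ≥ 0); exponents are nonnegative so '.toNat' is exact.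
def encoding_word (x : Int) : Int :=
  (PySem.List.pyRange 0 65).foldl (fun y i =>
    let bit : Int := if PySem.Int.band y ((1:Int) <<< i.toNat) ≠ 0 then 1 else 0
    if bit ≠ 0 then
      (PySem.List.pyRange 0 8).foldl (fun y l =>
        let sz : Int := (1:Int) <<< l.toNat
        PySem.Int.bxor y ((1:Int) <<< (65 + PySem.Int.mod (PySem.Int.floordiv i sz) 2 + 2 * l).toNat)) y
    else y) x

-- ===== PORT B =====
-- port of Source B: for each parity check (lev, b) build the coverage mask, then set the check bit iff
-- popcount(x & mask) is odd.  "bin(x & m).count('1')" is PySem.Int.bitCount (x & m): exact since x & m ≥ 0.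
def encoding_word_alt (x : Int) : Int :=
  (PySem.List.pyRange 0 8).foldl (fun y lev =>
    (PySem.List.pyRange 0 2).foldl (fun y b =>
      let m : Int := (PySem.List.pyRange 0 65).foldl (fun m i =>
        if PySem.Int.band (i >>> lev.toNat) 1 = b then PySem.Int.bor m ((1:Int) <<< i.toNat) else m) 0
      if PySem.Int.band ((PySem.Int.bitCount (PySem.Int.band x m) : Int)) 1 ≠ 0 then
        PySem.Int.bxor y ((1:Int) <<< (65 + 2 * lev + b).toNat)
      else y) y) x

-- ===== PRECONDITION & SPEC =====
def Spec_encoding_word (x : Int) (out : Int) : Prop := out = encoding_word_alt x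
instance (x : Int) (out : Int) : Decidable (Spec_encoding_word x out) := by unfold Spec_encoding_word; infer_instance

-- ===== CLAIM (what is proved, stated in full; the proofs are below) =====
def Claim_equal_encoding_word : Prop := ∀ (x : Int), Dom_encoding_word x → Spec_encoding_word x (encoding_word x)

-- ===== LEMMAS AND PROOFS =====

-- bit i of x in Python's infinite two's complement
def intBit (x : Int) (i : Nat) : Bool := if 0 ≤ x then x.toNat.testBit i else !((-x - 1).toNat.testBit i)

-- m - (m &&& n) = m ^^^ (m &&& n) (the subtrahend is a submask), key to reading PySem.Int.band's bits
theorem sub_and_eq_xor_and (m n : Nat) : m - (m &&& n) = m ^^^ (m &&& n) := by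
  induction m using Nat.strong_induction_on generalizing n with
  | _ m ih =>
    rcases Nat.eq_zero_or_pos m with h0 | hpos
    · subst h0; simp
    have hdiv : (m &&& n) / 2 = (m / 2) &&& (n / 2) := by
      apply Nat.eq_of_testBit_eq; intro i
      simp [Nat.testBit_div_two, Nat.testBit_and]
    have hxdiv : (m ^^^ (m &&& n)) / 2 = (m / 2) ^^^ ((m / 2) &&& (n / 2)) := by
      apply Nat.eq_of_testBit_eq; intro i
      simp [Nat.testBit_div_two, Nat.testBit_xor, Nat.testBit_and]
    have ih' := ih (m / 2) (Nat.div_lt_self hpos (by norm_num)) (n / 2)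
    have ha := Nat.testBit_and m n 0
    have hx := Nat.testBit_xor m (m &&& n) 0
    rw [Nat.testBit_zero, Nat.testBit_zero, Nat.testBit_zero] at ha
    rw [Nat.testBit_zero, Nat.testBit_zero, Nat.testBit_zero] at hx
    have ha' : ((m &&& n) % 2 = 1) ↔ ((m % 2 = 1) ∧ (n % 2 = 1)) := by
      by_cases hm : m % 2 = 1 <;> by_cases hn : n % 2 = 1 <;>
        simp [hm, hn] at ha ⊢ <;> try omega
    have hx' : ((m ^^^ (m &&& n)) % 2 = 1) ↔ ¬ ((m % 2 = 1) ↔ ((m &&& n) % 2 = 1)) := by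
      by_cases hm : m % 2 = 1 <;> by_cases hq : (m &&& n) % 2 = 1 <;>
        simp [hm, hq] at hx ⊢ <;> try omega
    have hle : (m / 2) &&& (n / 2) ≤ m / 2 := Nat.and_le_left
    have h1 := Nat.div_add_mod m 2
    have h2 := Nat.div_add_mod (m &&& n) 2
    have h3 := Nat.div_add_mod (m ^^^ (m &&& n)) 2
    have hm2 := Nat.mod_two_eq_zero_or_one m
    have hq2 := Nat.mod_two_eq_zero_or_one (m &&& n)
    have hx2 := Nat.mod_two_eq_zero_or_one (m ^^^ (m &&& n))
    have hn2 := Nat.mod_two_eq_zero_or_one n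
    omega

theorem band_toNat_testBit (x : Int) (m : Nat) (i : Nat) :
    ((PySem.Int.band x (m : Int)).toNat).testBit i = (intBit x i && m.testBit i) := by
  unfold PySem.Int.band intBit
  by_cases hx : 0 ≤ x
  · simp [hx, Nat.testBit_and, Bool.and_comm]
  · simp only [hx, if_pos (Int.natCast_nonneg m), if_false, Int.toNat_natCast]
    rw [sub_and_eq_xor_and m ((-x - 1).toNat)]
    simp only [Nat.testBit_xor, Nat.testBit_and]
    cases hm : m.testBit i <;> cases hn : (-x - 1).toNat.testBit i <;> simp

theorem band_natCast_nonneg (x : Int) (m : Nat) : 0 ≤ PySem.Int.band x (m : Int) := by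
  unfold PySem.Int.band
  by_cases hx : 0 ≤ x <;> simp [hx]

theorem bxor_bxor_natCast (x : Int) (c d : Nat) :
    PySem.Int.bxor (PySem.Int.bxor x (c : Int)) (d : Int) = PySem.Int.bxor x ((c ^^^ d : Nat) : Int) := by
  unfold PySem.Int.bxor
  by_cases hx : 0 ≤ x
  · simp [hx, Nat.xor_assoc]
  · have h1 : ¬ (0 ≤ -((((-x - 1).toNat ^^^ c : Nat)) : Int) - 1) := by omega
    simp only [hx, if_false, if_pos (Int.natCast_nonneg c), if_pos (Int.natCast_nonneg d),
      if_pos (Int.natCast_nonneg (c ^^^ d)), Int.toNat_natCast, h1]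
    congr 1
    have h2 : (-(-(((((-x - 1).toNat ^^^ c : Nat)) : Int)) - 1) - 1).toNat = ((-x - 1).toNat ^^^ c) := by
      omega
    rw [h2, Nat.xor_assoc]

theorem intBit_bxor_natCast (x : Int) (c : Nat) (i : Nat) :
    intBit (PySem.Int.bxor x (c : Int)) i = (intBit x i).xor (c.testBit i) := by
  unfold PySem.Int.bxor intBit
  by_cases hx : 0 ≤ x
  · simp [hx, Nat.testBit_xor]
  · have h1 : ¬ (0 ≤ -((((-x - 1).toNat ^^^ c : Nat)) : Int) - 1) := by omega
    simp only [hx, if_false, if_pos (Int.natCast_nonneg c), Int.toNat_natCast, h1]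
    have h2 : (-(-(((((-x - 1).toNat ^^^ c : Nat)) : Int)) - 1) - 1).toNat = ((-x - 1).toNat ^^^ c) := by
      omega
    rw [h2]
    simp [Nat.testBit_xor]

-- x & 2^i as a test of bit i
theorem band_two_pow_ne_zero (x : Int) (i : Nat) :
    (PySem.Int.band x ((2 ^ i : Nat) : Int) ≠ 0) ↔ intBit x i = true := by
  have hval : (PySem.Int.band x ((2 ^ i : Nat) : Int)).toNat = if intBit x i then 2 ^ i else 0 := by
    apply Nat.eq_of_testBit_eq; intro j
    rw [band_toNat_testBit]
    by_cases hij : i = j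
    · subst hij
      by_cases h : intBit x i <;> simp [h, Nat.testBit_two_pow]
    · by_cases h : intBit x i <;> simp [h, Nat.testBit_two_pow, hij]
  have hnn := band_natCast_nonneg x (2 ^ i)
  have hp : (0:Nat) < 2 ^ i := Nat.two_pow_pos i
  by_cases h : intBit x i
  · rw [if_pos h] at hval
    simp only [h, iff_true]
    omega
  · rw [if_neg (by simp [h])] at hval
    simp only [h, Bool.false_eq_true, iff_false, ne_eq, not_not]
    omega

-- proof-side shadow of A: which bits are hit, per-bit contribution, accumulated correction
def hitB (x : Int) (i : Nat) : Bool := decide (PySem.Int.band x ((2 ^ i : Nat) : Int) ≠ 0)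

def contrib (i : Nat) : Nat :=
  (List.range 8).foldl (fun c l => c ^^^ 2 ^ (65 + i / 2 ^ l % 2 + 2 * l)) 0

def CA (x : Int) : Nat :=
  (List.range 65).foldl (fun c i => if hitB x i then c ^^^ contrib i else c) 0

-- proof-side shadow of B: the mask, the parity, the accumulated correction
def maskN (lev b : Nat) : Nat :=
  (List.range 65).foldl (fun m i => if i / 2 ^ lev % 2 = b then m ||| 2 ^ i else m) 0

def parB (x : Int) (lev b : Nat) : Bool :=
  decide (PySem.Int.bitCount (PySem.Int.band x ((maskN lev b : Nat) : Int)) % 2 = 1)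

def CB (x : Int) : Nat :=
  (List.range 8).foldl (fun c lev =>
    (List.range 2).foldl (fun c b => if parB x lev b then c ^^^ 2 ^ (65 + 2 * lev + b) else c) c) 0

theorem testBit_foldl_xor_pow (L : List Nat) (e : Nat → Nat) (c0 k : Nat) :
    ((L.foldl (fun c l => c ^^^ 2 ^ e l) c0).testBit k)
      = L.foldl (fun s l => s.xor (decide (e l = k))) (c0.testBit k) := by
  induction L generalizing c0 with
  | nil => rfl
  | cons a L ih => simp [List.foldl_cons, ih, Nat.testBit_xor, Nat.testBit_two_pow]

theorem testBit_foldl_ite_xor (L : List Nat) (p : Nat → Bool) (f : Nat → Nat) (c0 k : Nat) :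
    ((L.foldl (fun c i => if p i then c ^^^ f i else c) c0).testBit k)
      = L.foldl (fun s i => s.xor (p i && (f i).testBit k)) (c0.testBit k) := by
  induction L generalizing c0 with
  | nil => rfl
  | cons a L ih =>
    simp only [List.foldl_cons]
    cases h : p a <;> simp [h, ih, Nat.testBit_xor]

theorem foldl_xor_false (L : List Nat) (g : Nat → Bool) (s0 : Bool)
    (h : ∀ l ∈ L, g l = false) : L.foldl (fun s l => s.xor (g l)) s0 = s0 := by
  induction L generalizing s0 with
  | nil => rfl
  | cons a L ih =>
    rw [List.foldl_cons, h a (List.mem_cons_self), Bool.xor_false]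
    exact ih _ (fun l hl => h l (List.mem_cons_of_mem _ hl))

theorem fold_xor_single (g : Nat → Bool) (j : Nat) : ∀ (L : List Nat), j ∈ L → L.Nodup →
    (∀ l ∈ L, l ≠ j → g l = false) → L.foldl (fun s l => s.xor (g l)) false = g j := by
  intro L
  induction L with
  | nil => intro h; cases h
  | cons a L ih =>
    intro hj hnd hz
    rcases List.mem_cons.mp hj with rfl | hjL
    · rw [List.foldl_cons, Bool.false_xor]
      exact foldl_xor_false L g (g j) (fun l hl =>
        hz l (List.mem_cons_of_mem _ hl) (fun he => (List.nodup_cons.mp hnd).1 (he ▸ hl)))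
    · rw [List.foldl_cons, hz a (List.mem_cons_self) (fun he => (List.nodup_cons.mp hnd).1 (he ▸ hjL)), Bool.xor_false]
      exact ih hjL (List.nodup_cons.mp hnd).2 (fun l hl => hz l (List.mem_cons_of_mem _ hl))

theorem contrib_testBit_low (i j : Nat) (hj : j < 65) : (contrib i).testBit j = false := by
  unfold contrib
  rw [testBit_foldl_xor_pow]
  rw [foldl_xor_false]
  · simp
  · intro l _; simp; omega

-- the inner loop of A

theorem contrib_testBit (i k : Nat) :
    (contrib i).testBit k =
      (decide (65 ≤ k) && decide (k < 81) && decide (i / 2 ^ ((k - 65) / 2) % 2 = (k - 65) % 2)) := by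
  unfold contrib
  rw [testBit_foldl_xor_pow]
  simp only [Nat.zero_testBit]
  by_cases hk : 65 ≤ k ∧ k < 81
  · obtain ⟨h1, h2⟩ := hk
    rw [fold_xor_single _ ((k - 65) / 2) _ (List.mem_range.mpr (by omega)) (List.nodup_range)
      (fun l _ hl => by
        have hm := Nat.mod_lt (i / 2 ^ l) (show 0 < 2 by norm_num)
        simp only [decide_eq_false_iff_not]
        omega)]
    have hm := Nat.mod_lt (i / 2 ^ ((k - 65) / 2)) (show 0 < 2 by norm_num)
    simp only [h1, h2, decide_true, Bool.true_and]
    exact decide_eq_decide.mpr (by omega)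
  · rw [foldl_xor_false _ _ _ (fun l hl => by
      have hm := Nat.mod_lt (i / 2 ^ l) (show 0 < 2 by norm_num)
      have hl8 := List.mem_range.mp hl
      simp only [decide_eq_false_iff_not]
      omega)]
    have : ¬ (65 ≤ k) ∨ ¬ (k < 81) := by omega
    rcases this with h | h <;> simp [h]

theorem inner_eq (x : Int) (iN : Nat) (c : Nat) :
    (PySem.List.pyRange 0 8).foldl (fun y l =>
        let sz : Int := (1:Int) <<< l.toNat
        PySem.Int.bxor y ((1:Int) <<< (65 + PySem.Int.mod (PySem.Int.floordiv (iN : Int) sz) 2 + 2 * l).toNat))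
      (PySem.Int.bxor x (c : Int))
    = PySem.Int.bxor x ((c ^^^ contrib iN : Nat) : Int) := by
  have hr : PySem.List.pyRange 0 8 = (List.range 8).map (fun k => (0:Int) + (k:Int)) := by
    have := PySem.List.pyRange_one 0 8
    simpa using this
  rw [hr, List.foldl_map]
  have main : ∀ (n : Nat) (c : Nat),
      (List.range n).foldl (fun (y : Int) (k : Nat) =>
        let sz : Int := (1:Int) <<< ((0:Int) + (k:Int)).toNat
        PySem.Int.bxor y ((1:Int) <<< (65 + PySem.Int.mod (PySem.Int.floordiv (iN : Int) sz) 2 + 2 * ((0:Int) + (k:Int))).toNat))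
        (PySem.Int.bxor x (c : Int))
      = PySem.Int.bxor x (((c ^^^ (List.range n).foldl (fun c l => c ^^^ 2 ^ (65 + iN / 2 ^ l % 2 + 2 * l)) 0 : Nat)) : Int) := by
    intro n
    induction n with
    | zero => simp
    | succ n ih =>
      intro c
      rw [List.range_succ, List.foldl_append, List.foldl_append, ih c]
      simp only [List.foldl_cons, List.foldl_nil, zero_add, Int.toNat_natCast]
      have hsz : (1:Int) <<< n = (((2:Nat) ^ n : Nat) : Int) := by
        rw [Int.shiftLeft_eq]; push_cast; ring
      have hfd : PySem.Int.floordiv (iN : Int) ((1:Int) <<< n) = ((iN / 2 ^ n : Nat) : Int) := by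
        rw [hsz]; exact_mod_cast PySem.Int.floordiv_natCast iN (2 ^ n)
      have hmd : PySem.Int.mod ((( iN / 2 ^ n : Nat)) : Int) 2 = ((iN / 2 ^ n % 2 : Nat) : Int) := by
        exact_mod_cast PySem.Int.mod_natCast (iN / 2 ^ n) 2
      rw [hfd, hmd]
      have he : ((65 : Int) + ((iN / 2 ^ n % 2 : Nat) : Int) + 2 * (n : Int)).toNat
          = 65 + iN / 2 ^ n % 2 + 2 * n := by omega
      rw [he]
      have hsh : (1:Int) <<< (65 + iN / 2 ^ n % 2 + 2 * n)
          = (((2:Nat) ^ (65 + iN / 2 ^ n % 2 + 2 * n) : Nat) : Int) := by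
        rw [Int.shiftLeft_eq]; push_cast; ring
      rw [hsh, bxor_bxor_natCast, Nat.xor_assoc]
  have := main 8 c
  simpa [contrib] using this

theorem hitB_iff (x : Int) (i : Nat) : hitB x i = intBit x i := by
  unfold hitB
  calc decide (PySem.Int.band x ((2 ^ i : Nat) : Int) ≠ 0) = decide (intBit x i = true) := by
        exact decide_eq_decide.mpr (band_two_pow_ne_zero x i)
    _ = intBit x i := by cases intBit x i <;> simp

theorem A_eq (x : Int) : encoding_word x = PySem.Int.bxor x ((CA x : Nat) : Int) := by
  unfold encoding_word
  have hr : PySem.List.pyRange 0 65 = (List.range 65).map (fun (k : Nat) => (0:Int) + (k:Int)) := by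
    decide
  rw [hr, List.foldl_map]
  have main : ∀ (n : Nat), n ≤ 65 →
      ((List.range n).foldl (fun (y : Int) (k : Nat) =>
        let bit : Int := if PySem.Int.band y ((1:Int) <<< ((0:Int) + (k:Int)).toNat) ≠ 0 then 1 else 0
        if bit ≠ 0 then
          (PySem.List.pyRange 0 8).foldl (fun y l =>
            let sz : Int := (1:Int) <<< l.toNat
            PySem.Int.bxor y ((1:Int) <<< (65 + PySem.Int.mod (PySem.Int.floordiv ((0:Int) + (k:Int)) sz) 2 + 2 * l).toNat)) y
        else y) x
      = PySem.Int.bxor x (((List.range n).foldl (fun c i => if hitB x i then c ^^^ contrib i else c) 0 : Nat) : Int))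
      ∧ ∀ j, j < 65 →
        (((List.range n).foldl (fun c i => if hitB x i then c ^^^ contrib i else c) 0 : Nat)).testBit j = false := by
    intro n
    induction n with
    | zero =>
      intro _
      refine ⟨?_, by simp⟩
      simp
    | succ n ih =>
      intro hn
      obtain ⟨ihy, ihp⟩ := ih (by omega)
      constructor
      · rw [List.range_succ, List.foldl_append, List.foldl_append, ihy]
        simp only [List.foldl_cons, List.foldl_nil, zero_add, Int.toNat_natCast]
        set c : Nat := (List.range n).foldl (fun c i => if hitB x i then c ^^^ contrib i else c) 0 with hc
        have hsz : (1:Int) <<< n = (((2:Nat) ^ n : Nat) : Int) := by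
          rw [Int.shiftLeft_eq]; push_cast; ring
        have hcond : (PySem.Int.band (PySem.Int.bxor x (c : Int)) ((1:Int) <<< n) ≠ 0) ↔ hitB x n = true := by
          rw [hsz, band_two_pow_ne_zero, intBit_bxor_natCast, ihp n (by omega), hitB_iff]
          simp
        by_cases h : hitB x n = true
        · rw [if_pos (by simpa [hcond.mpr h] using one_ne_zero), if_pos h]
          exact inner_eq x n c
        · have h' : ¬ (PySem.Int.band (PySem.Int.bxor x (c : Int)) ((1:Int) <<< n) ≠ 0) :=
            fun hcc => h (hcond.mp hcc)
          rw [if_neg (by simp [h']), if_neg h]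
      · intro j hj
        rw [List.range_succ, List.foldl_append]
        simp only [List.foldl_cons, List.foldl_nil]
        by_cases h : hitB x n = true
        · rw [if_pos h, Nat.testBit_xor, ihp j hj, contrib_testBit_low n j hj]; rfl
        · rw [if_neg h]; exact ihp j hj
  exact (main 65 (le_refl _)).1

theorem mask_eq (levN bN : Nat) :
    ((List.range 65).foldl (fun (m : Int) (k : Nat) =>
        if PySem.Int.band ((k : Int) >>> ((levN : Nat) : Int)) 1 = ((bN : Nat) : Int)
        then PySem.Int.bor m ((1:Int) <<< k) else m) 0)
      = ((maskN levN bN : Nat) : Int) := by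
  unfold maskN
  have main : ∀ (n : Nat) (a : Nat),
      (List.range n).foldl (fun (m : Int) (k : Nat) =>
        if PySem.Int.band ((k : Int) >>> ((levN : Nat) : Int)) 1 = ((bN : Nat) : Int)
        then PySem.Int.bor m ((1:Int) <<< k) else m) (a : Int)
      = (((List.range n).foldl (fun m i => if i / 2 ^ levN % 2 = bN then m ||| 2 ^ i else m) a : Nat) : Int) := by
    intro n
    induction n with
    | zero => intro a; simp
    | succ n ih =>
      intro a
      rw [List.range_succ, List.foldl_append, List.foldl_append, ih a]
      simp only [List.foldl_cons, List.foldl_nil]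
      have hshr : ((n : Int)) >>> ((levN : Nat) : Int) = ((n >>> levN : Nat) : Int) :=
        Int.shiftRight_natCast n levN
      have hband : PySem.Int.band ((n >>> levN : Nat) : Int) 1 = ((n >>> levN) % 2 : Nat) := by
        have := PySem.Int.band_natCast (n >>> levN) 1
        simpa [Nat.and_one_is_mod] using this
      rw [hshr, hband]
      have hcond : (((n >>> levN) % 2 : Nat) : Int) = ((bN : Int)) ↔ (n / 2 ^ levN % 2 = bN) := by
        rw [Nat.shiftRight_eq_div_pow]
        exact_mod_cast Nat.cast_inj
      by_cases h : n / 2 ^ levN % 2 = bN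
      · rw [if_pos (hcond.mpr h), if_pos h]
        have hsh : (1:Int) <<< n = (((2:Nat) ^ n : Nat) : Int) := by
          rw [Int.shiftLeft_eq]; push_cast; ring
        rw [hsh]
        exact_mod_cast PySem.Int.bor_natCast _ (2 ^ n)
      · rw [if_neg (fun hc => h (hcond.mp hc)), if_neg h]
  exact main 65 0

theorem parcond (x : Int) (L B : Nat) :
    (PySem.Int.band ((PySem.Int.bitCount (PySem.Int.band x ((maskN L B : Nat) : Int)) : Int)) 1 ≠ 0)
      ↔ parB x L B = true := by
  set c : Nat := PySem.Int.bitCount (PySem.Int.band x ((maskN L B : Nat) : Int)) with hc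
  have hband : PySem.Int.band (c : Int) 1 = ((c % 2 : Nat) : Int) := by
    have := PySem.Int.band_natCast c 1
    simpa [Nat.and_one_is_mod] using this
  rw [hband]
  unfold parB
  rw [← hc]
  have := Nat.mod_two_eq_zero_or_one c
  constructor
  · intro h; simp; omega
  · intro h; simp at h; omega

theorem B_eq (x : Int) : encoding_word_alt x = PySem.Int.bxor x ((CB x : Nat) : Int) := by
  unfold encoding_word_alt
  have hr8 : PySem.List.pyRange 0 8 = (List.range 8).map (fun (k : Nat) => (0:Int) + (k:Int)) := by
    decide
  rw [hr8, List.foldl_map]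
  simp only [zero_add, Int.toNat_natCast]
  unfold CB
  have main : ∀ (n : Nat) (c : Nat) (y : Int), y = PySem.Int.bxor x (c : Int) →
      (List.range n).foldl (fun (y : Int) (k : Nat) =>
        (PySem.List.pyRange 0 2).foldl (fun y b =>
          if PySem.Int.band ((PySem.Int.bitCount (PySem.Int.band x
              ((PySem.List.pyRange 0 65).foldl (fun (m i : Int) =>
                if PySem.Int.band (i >>> ((k : Nat) : Int)) 1 = b
                then PySem.Int.bor m ((1:Int) <<< i.toNat) else m) 0)) : Int)) 1 ≠ 0 then
            PySem.Int.bxor y ((1:Int) <<< (65 + 2 * ((k : Nat) : Int) + b).toNat)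
          else y) y) y
      = PySem.Int.bxor x (((List.range n).foldl (fun c lev =>
          (List.range 2).foldl (fun c b => if parB x lev b then c ^^^ 2 ^ (65 + 2 * lev + b) else c) c) c : Nat) : Int) := by
    intro n
    induction n with
    | zero => intro c y hy; simpa using hy
    | succ n ih =>
      intro c y hy
      rw [List.range_succ, List.foldl_append, List.foldl_append, ih c y hy]
      simp only [List.foldl_cons, List.foldl_nil]
      rw [show PySem.List.pyRange 0 2 = [(0:Int), 1] from by decide]
      simp only [List.foldl_cons, List.foldl_nil]
      set c' : Nat := (List.range n).foldl (fun c lev =>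
          (List.range 2).foldl (fun c b => if parB x lev b then c ^^^ 2 ^ (65 + 2 * lev + b) else c) c) c with hc'
      rw [show (List.range 2) = [0, 1] from rfl]
      simp only [List.foldl_cons, List.foldl_nil]
      have hmask : ∀ (bI : Int), (PySem.List.pyRange 0 65).foldl (fun (m i : Int) =>
          if PySem.Int.band (i >>> ((n : Nat) : Int)) 1 = bI
          then PySem.Int.bor m ((1:Int) <<< i.toNat) else m) 0
          = ((List.range 65).foldl (fun (m : Int) (k : Nat) =>
              if PySem.Int.band ((k : Int) >>> ((n : Nat) : Int)) 1 = bI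
              then PySem.Int.bor m ((1:Int) <<< k) else m) 0) := by
        intro bI
        rw [show PySem.List.pyRange 0 65 = (List.range 65).map (fun (k : Nat) => (0:Int) + (k:Int)) from by decide,
          List.foldl_map]
        simp only [zero_add, Int.toNat_natCast]
      have hm0 := mask_eq n 0
      have hm1 := mask_eq n 1
      rw [Nat.cast_zero] at hm0
      rw [Nat.cast_one] at hm1
      rw [hmask 0, hmask 1, hm0, hm1]
      have he0 : ((65 + 2 * ((n:Nat) : Int) + 0).toNat) = 65 + 2 * n + 0 := by omega
      have he1 : ((65 + 2 * ((n:Nat) : Int) + 1).toNat) = 65 + 2 * n + 1 := by omega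
      rw [he0, he1]
      have hs0 : (1:Int) <<< (65 + 2 * n + 0) = (((2:Nat) ^ (65 + 2 * n + 0) : Nat) : Int) := by
        rw [Int.shiftLeft_eq]; push_cast; ring
      have hs1 : (1:Int) <<< (65 + 2 * n + 1) = (((2:Nat) ^ (65 + 2 * n + 1) : Nat) : Int) := by
        rw [Int.shiftLeft_eq]; push_cast; ring
      by_cases h0 : parB x n 0 <;> by_cases h1 : parB x n 1
      · rw [if_pos ((parcond x n 0).mpr h0), if_pos ((parcond x n 1).mpr h1), if_pos h0, if_pos h1,
          hs0, hs1, bxor_bxor_natCast, bxor_bxor_natCast, Nat.xor_assoc]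
      · rw [if_pos ((parcond x n 0).mpr h0), if_neg (fun hcc => h1 ((parcond x n 1).mp hcc)),
          if_pos h0, if_neg h1, hs0, bxor_bxor_natCast]
      · rw [if_neg (fun hcc => h0 ((parcond x n 0).mp hcc)), if_pos ((parcond x n 1).mpr h1),
          if_neg h0, if_pos h1, hs1, bxor_bxor_natCast]
      · rw [if_neg (fun hcc => h0 ((parcond x n 0).mp hcc)), if_neg (fun hcc => h1 ((parcond x n 1).mp hcc)),
          if_neg h0, if_neg h1]
  exact main 8 0 x (by simp)

theorem nest2' {α : Type} (f : α → Nat → α) : ∀ (n : Nat) (init : α),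
    (List.range n).foldl (fun s lev => f (f s (2 * lev)) (2 * lev + 1)) init
      = (List.range (2 * n)).foldl f init := by
  intro n
  induction n with
  | zero => intro init; rfl
  | succ n ih =>
    intro init
    rw [List.range_succ, List.foldl_append, ih]
    rw [show 2 * (n + 1) = (2 * n + 1) + 1 by ring, List.range_succ, List.range_succ,
      List.foldl_append, List.foldl_append]
    simp

theorem nest2 {α : Type} (f : α → Nat → α) (n : Nat) (init : α) :
    (List.range n).foldl (fun s lev => (List.range 2).foldl (fun s b => f s (2 * lev + b)) s) init
      = (List.range (2 * n)).foldl f init := by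
  rw [← nest2' f n init]
  simp only [show (List.range 2) = [0, 1] from rfl, List.foldl_cons, List.foldl_nil, Nat.add_zero]

theorem maskN_testBit (lev b k : Nat) :
    (maskN lev b).testBit k = (decide (k < 65) && decide (k / 2 ^ lev % 2 = b)) := by
  unfold maskN
  have main : ∀ (n : Nat),
      (((List.range n).foldl (fun m i => if i / 2 ^ lev % 2 = b then m ||| 2 ^ i else m) 0).testBit k)
        = (decide (k < n) && decide (k / 2 ^ lev % 2 = b)) := by
    intro n
    induction n with
    | zero => simp
    | succ n ih =>
      rw [List.range_succ, List.foldl_append]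
      simp only [List.foldl_cons, List.foldl_nil]
      by_cases h : n / 2 ^ lev % 2 = b
      · rw [if_pos h, Nat.testBit_or, ih, Nat.testBit_two_pow]
        by_cases hq : k / 2 ^ lev % 2 = b
        · by_cases hkn : k = n
          · subst hkn; simp [hq, show k < k + 1 from by omega]
          · by_cases hlt : k < n
            · simp [hq, hlt, show k < n + 1 from by omega, Ne.symm hkn]
            · simp [hq, hlt, show ¬ (k < n + 1) from by omega, Ne.symm hkn]
        · by_cases hkn : k = n
          · exact absurd (hkn ▸ h) hq
          · simp [hq, Ne.symm hkn]
      · rw [if_neg h, ih]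
        by_cases hq : k / 2 ^ lev % 2 = b
        · have hkn : k ≠ n := fun he => h (he ▸ hq)
          simp only [hq, decide_true, Bool.and_true]
          exact decide_eq_decide.mpr (by omega)
        · simp [hq]
  exact main 65

theorem fold_xor_init (L : List Nat) (g : Nat → Bool) (b : Bool) :
    L.foldl (fun s l => s.xor (g l)) b = b.xor (L.foldl (fun s l => s.xor (g l)) false) := by
  induction L generalizing b with
  | nil => simp
  | cons a L ih =>
    rw [List.foldl_cons, List.foldl_cons, ih ((b.xor (g a))), ih (Bool.xor false (g a))]
    cases b <;> cases g a <;> simp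

theorem parity_fold (n : Nat) : ∀ (v : Nat), v < 2 ^ n →
    (List.range n).foldl (fun s i => s.xor (v.testBit i)) false
      = decide (PySem.Int.bitCount (v : Int) % 2 = 1) := by
  induction n with
  | zero =>
    intro v hv
    interval_cases v
    simp [PySem.Int.bitCount_zero]
  | succ n ih =>
    intro v hv
    rcases Nat.eq_zero_or_pos v with rfl | hpos
    · rw [foldl_xor_false _ _ _ (fun l _ => by simp)]
      simp [PySem.Int.bitCount_zero]
    · rw [List.range_succ_eq_map, List.foldl_cons, List.foldl_map, Bool.false_xor]
      have hstep : (List.range n).foldl (fun s i => s.xor (v.testBit (i + 1))) (v.testBit 0)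
          = (v.testBit 0).xor ((List.range n).foldl (fun s i => s.xor ((v / 2).testBit i)) false) := by
        rw [show (fun (s : Bool) (i : Nat) => s.xor (v.testBit (i + 1)))
            = (fun (s : Bool) (i : Nat) => s.xor ((v / 2).testBit i)) from
          funext fun s => funext fun i => by rw [Nat.testBit_div_two]]
        exact fold_xor_init _ _ _
      rw [hstep, ih (v / 2) (by omega)]
      rw [PySem.Int.bitCount_natCast hpos]
      rw [Nat.testBit_zero]
      set c := PySem.Int.bitCount ((v / 2 : Nat) : Int) with hcdef
      have hiff : ((v % 2 + c) % 2 = 1) ↔ ¬ (v % 2 = 1 ↔ c % 2 = 1) := by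
        have h2 := Nat.mod_two_eq_zero_or_one v
        have h3 := Nat.mod_two_eq_zero_or_one c
        omega
      rw [show decide ((v % 2 + c) % 2 = 1) = decide (¬ (v % 2 = 1 ↔ c % 2 = 1)) from
        decide_eq_decide.mpr hiff]
      by_cases hp : v % 2 = 1 <;> by_cases hq : c % 2 = 1 <;> simp [hp, hq]

theorem bridge (x : Int) (L B : Nat) :
    (List.range 65).foldl (fun s i => s.xor (hitB x i && decide (i / 2 ^ L % 2 = B))) false
      = parB x L B := by
  have hv : ∀ i, ((PySem.Int.band x ((maskN L B : Nat) : Int)).toNat).testBit i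
      = (hitB x i && decide (i / 2 ^ L % 2 = B) && decide (i < 65)) := by
    intro i
    rw [band_toNat_testBit, maskN_testBit, hitB_iff]
    cases intBit x i <;> cases hd1 : decide (i < 65) <;> cases hd2 : decide (i / 2 ^ L % 2 = B) <;>
      simp [hd1, hd2]
  set v := (PySem.Int.band x ((maskN L B : Nat) : Int)).toNat with hvdef
  have hvlt : v < 2 ^ 65 :=
    Nat.lt_pow_two_of_testBit v (fun i hi => by
      rw [hv i]; simp [show ¬ (i < 65) from by omega])
  have hpar : parB x L B = decide (PySem.Int.bitCount ((v : Nat) : Int) % 2 = 1) := by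
    unfold parB
    rw [← Int.toNat_of_nonneg (band_natCast_nonneg x (maskN L B))]
  rw [hpar, ← parity_fold 65 v hvlt]
  apply PySem.List.foldl_congr_mem
  intro acc i hi
  rw [hv i]
  simp [List.mem_range.mp hi]

theorem CA_eq_CB (x : Int) : CA x = CB x := by
  have hcb : CB x = (List.range 16).foldl
      (fun c p => if parB x (p / 2) (p % 2) then c ^^^ 2 ^ (65 + p) else c) 0 := by
    unfold CB
    rw [← nest2 (fun c p => if parB x (p / 2) (p % 2) then c ^^^ 2 ^ (65 + p) else c) 8 0]
    congr 1
    funext c lev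
    simp only [show (List.range 2) = [0, 1] from rfl, List.foldl_cons, List.foldl_nil,
      Nat.add_zero, ← Nat.add_assoc]
    rw [show 2 * lev / 2 = lev from by omega, show 2 * lev % 2 = 0 from by omega,
      show (2 * lev + 1) / 2 = lev from by omega, show (2 * lev + 1) % 2 = 1 from by omega]
  apply Nat.eq_of_testBit_eq
  intro k
  unfold CA
  rw [hcb, testBit_foldl_ite_xor, testBit_foldl_ite_xor]
  simp only [Nat.zero_testBit, Nat.testBit_two_pow, contrib_testBit]
  by_cases hk : 65 ≤ k ∧ k < 81
  · obtain ⟨h1, h2⟩ := hk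
    have hz : ∀ p ∈ List.range 16, p ≠ k - 65 →
        (parB x (p / 2) (p % 2) && decide (65 + p = k)) = false := by
      intro p _ hne
      simp only [Bool.and_eq_false_iff, decide_eq_false_iff_not]
      right
      intro hek
      exact hne (by omega)
    rw [fold_xor_single (fun p => parB x (p / 2) (p % 2) && decide (65 + p = k)) (k - 65)
      (List.range 16) (List.mem_range.mpr (by omega)) List.nodup_range hz]
    rw [show 65 + (k - 65) = k from by omega]
    simp only [h1, h2, decide_true, Bool.true_and, Bool.and_true]
    exact bridge x ((k - 65) / 2) ((k - 65) % 2)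
  · rw [foldl_xor_false _ _ _ (fun l _ => by
        have h65 : ¬ (65 ≤ k) ∨ ¬ (k < 81) := by omega
        rcases h65 with h | h <;> simp [h]),
      foldl_xor_false _ _ _ (fun p hp => by
        have := List.mem_range.mp hp
        simp only [Bool.and_eq_false_iff, decide_eq_false_iff_not]
        right
        omega)]


-- ===== VERDICT (by name: the statement is the Claim_ definition above) =====
theorem encoding_word_spec : Claim_equal_encoding_word := by
  intro x _
  show encoding_word x = encoding_word_alt x
  rw [A_eq, B_eq, CA_eq_CB]
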